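-- pv_equiv track=rewrite | github.com/LoveBroman/aoc2023 | ex3.py | is_adjancent
-- ===== SOURCE A (Python) =====
-- def in_range(ls, ind, in_combs):
--     def criteria(x):
--         return (x[0] + ind[0] < len(ls)) and (x[0] + ind[0] >= 0) and (x[1] + ind[1] < len(ls[0])) and (x[1] + ind[1] >= 0)
--     return list(filter(criteria, in_combs))
--
-- def is_adjancent(ls, ind, sym_set):
--     if ind == (127, 139):
--          pass
--     indy, indx = ind[0], ind[1]
--     in_combs = [(-1, -1), (-1, 0), (0, -1), (-1, 1), (1, -1), (0, 1), (1, 0), (1, 1)]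
--     in_combs = in_range(ls, ind, in_combs)
--     for ip in in_combs:
--         if ls[indy + ip[0]][indx + ip[1]] in sym_set:
--             return True
--     return False
-- ===== SOURCE B (Python) =====
-- def is_adjancent(ls, ind, sym_set):
--     y, x = ind
--     syms = set(sym_set)
--     for ry, row in enumerate(ls):
--         if ry < y - 1 or ry > y + 1:
--             continue
--         for rx in range(len(ls[0])):
--             if x - 1 <= rx <= x + 1 and (ry, rx) != (y, x) and row[rx] in syms:
--                 return True
--     return False
-- ===== Notes on version B (the rewrite author's own statement) =====
-- stated objective: alternative
-- what changed: A enumerates the 8 neighbour offsets, filters them through the separate in_range helper (with a dead (127,139) no-op) and then scans the filtered list indexing the grid; B never builds an offset list: it scans the grid itself - every row via enumerate with a row-distance guard, then the columns 0..len(ls[0]) - testing each cell with a combined Chebyshev-distance-1 / not-the-center / symbol-membership predicate against a prebuilt set.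
-- outside the precondition, e.g. on is_adjancent(['xyz', 'ab', '*qr'], (2, 1), {'*'}): A returns True, B raises IndexError
import Mathlib
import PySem

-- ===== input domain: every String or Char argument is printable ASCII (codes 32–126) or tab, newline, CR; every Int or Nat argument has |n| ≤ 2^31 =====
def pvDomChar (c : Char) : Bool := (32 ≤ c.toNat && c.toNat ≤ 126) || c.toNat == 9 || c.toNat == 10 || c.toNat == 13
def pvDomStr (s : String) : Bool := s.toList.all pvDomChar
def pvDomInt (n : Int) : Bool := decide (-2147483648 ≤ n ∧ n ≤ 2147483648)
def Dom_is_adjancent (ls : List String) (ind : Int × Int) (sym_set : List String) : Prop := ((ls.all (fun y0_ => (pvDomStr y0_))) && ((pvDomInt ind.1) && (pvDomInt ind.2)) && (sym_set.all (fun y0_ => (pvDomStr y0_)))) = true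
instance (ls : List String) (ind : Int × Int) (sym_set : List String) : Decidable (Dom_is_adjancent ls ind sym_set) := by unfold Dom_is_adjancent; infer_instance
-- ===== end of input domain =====

-- B replaces A's offset enumeration (build the 8-offset list, filter it through the
-- `in_range` helper, then scan the survivors indexing the grid) by a grid scan: walk every
-- row with enumerate, skip rows at row-distance > 1, and scan the columns 0..len(ls[0])
-- with a combined distance-1 / not-the-center / symbol predicate (alternative decomposition).

-- ===== PORT A =====

-- criteria(x) of in_range; `len(ls[0])` is only reached when the row index is in range,
-- so `ls.headD ""` is evaluated exactly where Python evaluates `ls[0]`.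
def pvCriteria (ls : List String) (ind : Int × Int) (x : Int × Int) : Bool :=
  decide (x.1 + ind.1 < (ls.length : Int)) && decide (x.1 + ind.1 ≥ 0) &&
  decide (x.2 + ind.2 < PySem.Str.len (ls.headD "")) && decide (x.2 + ind.2 ≥ 0)

def in_range (ls : List String) (ind : Int × Int) (in_combs : List (Int × Int)) : List (Int × Int) :=
  in_combs.filter (pvCriteria ls ind)

-- the `for ip in in_combs: if ls[indy+ip[0]][indx+ip[1]] in sym_set: return True` loop
def pvLoopA (ls : List String) (indy indx : Int) (sym_set : List String) : List (Int × Int) → Bool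
  | [] => false
  | ip :: rest =>
    match PySem.List.pyGet? ls (indy + ip.1) with
    | none => false   -- IndexError (row index; unreachable: in_range checked it)
    | some row =>
      match PySem.Str.pyGet? row (indx + ip.2) with
      | none => false   -- IndexError (ragged row shorter than ls[0]); excluded by Pre_
      | some c =>
        if sym_set.contains (String.singleton c) then true
        else pvLoopA ls indy indx sym_set rest

def is_adjancent (ls : List String) (ind : Int × Int) (sym_set : List String) : Bool :=
  -- `if ind == (127, 139): pass` is a no-op and is omitted
  let indy := ind.1
  let indx := ind.2
  let in_combs : List (Int × Int) :=
    [(-1, -1), (-1, 0), (0, -1), (-1, 1), (1, -1), (0, 1), (1, 0), (1, 1)]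
  let in_combs := in_range ls ind in_combs
  pvLoopA ls indy indx sym_set in_combs

-- ===== PORT B =====
-- grid scan: outer early-return loop over enumerate(ls) with the `continue` guard,
-- inner early-return loop over range(len(ls[0])); row[rx] → Str.pyGet? (none = IndexError,
-- excluded by Pre_); set(sym_set) → PySem.Set.ofList.
def is_adjancent_alt (ls : List String) (ind : Int × Int) (sym_set : List String) : Bool :=
  let y := ind.1
  let x := ind.2
  let syms := PySem.Set.ofList sym_set
  (PySem.List.enumerate ls 0).any (fun rp =>
    if decide (rp.1 < y - 1) || decide (rp.1 > y + 1) then false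
    else
      (PySem.List.pyRange 0 (PySem.Str.len (ls.headD "")) 1).any (fun rx =>
        decide (x - 1 ≤ rx) && decide (rx ≤ x + 1) &&
        !(decide (rp.1 = y) && decide (rx = x)) &&
        (match PySem.Str.pyGet? rp.2 rx with
         | none => false
         | some c => PySem.Set.contains syms (String.singleton c))))

-- ===== PRECONDITION & SPEC =====
-- Pre_ excludes ragged grids on which some neighbour offset is in bounds by the first
-- row's width but lands past the end of its actual (shorter) row: there Python A raises
-- IndexError (or, if an earlier offset already hit a symbol, happens to return True).
def Pre_is_adjancent (ls : List String) (ind : Int × Int) (sym_set : List String) : Prop :=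
  ∀ p : Int × Int,
    p ∈ ([(-1, -1), (-1, 0), (0, -1), (-1, 1), (1, -1), (0, 1), (1, 0), (1, 1)] : List (Int × Int)) →
    (0 ≤ ind.1 + p.1 ∧ ind.1 + p.1 < (ls.length : Int) ∧
     0 ≤ ind.2 + p.2 ∧ ind.2 + p.2 < PySem.Str.len (ls.headD "")) →
    ind.2 + p.2 < PySem.Str.len (ls.getD (ind.1 + p.1).toNat "")
instance (ls : List String) (ind : Int × Int) (sym_set : List String) : Decidable (Pre_is_adjancent ls ind sym_set) := by unfold Pre_is_adjancent; infer_instance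

def pvWitness_is_adjancent : List String × (Int × Int) × List String :=
  (["12*", ".4.", "..."], (1, 1), ["*", "#"])

def Spec_is_adjancent (ls : List String) (ind : Int × Int) (sym_set : List String) (out : Bool) : Prop := out = is_adjancent_alt ls ind sym_set
instance (ls : List String) (ind : Int × Int) (sym_set : List String) (out : Bool) : Decidable (Spec_is_adjancent ls ind sym_set out) := by unfold Spec_is_adjancent; infer_instance

-- ===== CLAIM (what is proved, stated in full; the proofs are below) =====
def Claim_equal_is_adjancent : Prop := ∀ (ls : List String) (ind : Int × Int) (sym_set : List String), Dom_is_adjancent ls ind sym_set → Pre_is_adjancent ls ind sym_set → Spec_is_adjancent ls ind sym_set (is_adjancent ls ind sym_set)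

-- ===== LEMMAS AND PROOFS =====

-- `ls[y][x] in sym_set` : the character (a length-1 string in Python) looked up in sym_set;
-- none = IndexError (those inputs are excluded by Pre_).
def pvProbe (ls : List String) (sym_set : List String) (y x : Int) : Bool :=
  match PySem.List.pyGet? ls y with
  | none => false
  | some row =>
    match PySem.Str.pyGet? row x with
    | none => false
    | some c => sym_set.contains (String.singleton c)

-- the per-offset condition both programs decide: in bounds (by row 0's width) and a symbol hit
def pvGood (ls : List String) (ind : Int × Int) (sym_set : List String) (p : Int × Int) : Bool :=
  pvCriteria ls ind p && pvProbe ls sym_set (ind.1 + p.1) (ind.2 + p.2)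

-- Under Pre_, every character access A performs succeeds, so A's early-return loop over
-- the filtered offsets is the `any` of pvProbe over them.
theorem pvLoopA_eq_any (ls : List String) (ind : Int × Int) (sym_set : List String)
    (l : List (Int × Int))
    (hw : ∀ p ∈ l, ∃ row c, PySem.List.pyGet? ls (ind.1 + p.1) = some row ∧
            PySem.Str.pyGet? row (ind.2 + p.2) = some c) :
    pvLoopA ls ind.1 ind.2 sym_set l
      = l.any (fun p => pvProbe ls sym_set (ind.1 + p.1) (ind.2 + p.2)) := by
  induction l with
  | nil => rfl
  | cons p rest ih =>
    obtain ⟨row, c, hrow, hc⟩ := hw p (List.mem_cons_self ..)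
    have hrest := fun q hq => hw q (List.mem_cons_of_mem _ hq)
    simp only [pvLoopA, pvProbe, List.any_cons, hrow, hc, ih hrest]
    cases sym_set.contains (String.singleton c) <;> simp

theorem pvCriteria_well (ls : List String) (ind : Int × Int) (sym_set : List String)
    (hpre : Pre_is_adjancent ls ind sym_set) (p : Int × Int)
    (hmem : p ∈ ([(-1, -1), (-1, 0), (0, -1), (-1, 1), (1, -1), (0, 1), (1, 0), (1, 1)] : List (Int × Int)))
    (hc : pvCriteria ls ind p = true) :
    ∃ row c, PySem.List.pyGet? ls (ind.1 + p.1) = some row ∧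
      PySem.Str.pyGet? row (ind.2 + p.2) = some c := by
  simp only [pvCriteria, Bool.and_eq_true, decide_eq_true_eq, ge_iff_le] at hc
  obtain ⟨⟨⟨h1, h2⟩, h3⟩, h4⟩ := hc
  rw [Int.add_comm] at h1 h2 h3 h4
  have hrowlen := hpre p hmem ⟨h2, h1, h4, h3⟩
  have hy0 : (0 : Int) ≤ ind.1 + p.1 := h2
  have hy1 : ind.1 + p.1 < (ls.length : Int) := h1
  refine ⟨ls[(ind.1 + p.1).toNat], ?_⟩
  have hget : PySem.List.pyGet? ls (ind.1 + p.1) = some ls[(ind.1 + p.1).toNat] :=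
    PySem.List.pyGet?_eq_some_getElem ls hy0 hy1
  have hrow_eq : ls.getD (ind.1 + p.1).toNat "" = ls[(ind.1 + p.1).toNat] := by
    rw [List.getD_eq_getElem?_getD, List.getElem?_eq_getElem (by omega), Option.getD_some]
  rw [hrow_eq, PySem.Str.len_eq] at hrowlen
  have hx : PySem.List.pyGet? (ls[(ind.1 + p.1).toNat] : String).toList (ind.2 + p.2)
      = some (ls[(ind.1 + p.1).toNat] : String).toList[(ind.2 + p.2).toNat] :=
    PySem.List.pyGet?_eq_some_getElem _ h4 hrowlen
  exact ⟨_, hget, hx⟩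

-- B's grid scan hits a cell iff some offset of A's 8-offset list is in bounds and a symbol.
theorem pvMem8 (dy dx : Int) : (dy,dx) ∈ ([(-1, -1), (-1, 0), (0, -1), (-1, 1), (1, -1), (0, 1), (1, 0), (1, 1)] : List (Int × Int)) ↔ ((dy=-1 ∨ dy=0 ∨ dy=1) ∧ (dx=-1∨dx=0∨dx=1) ∧ ¬(dy=0 ∧ dx=0)) := by
  simp [List.mem_cons, Prod.mk.injEq]; omega

theorem pvContains (xs : List String) (v : String) :
    PySem.Set.contains (PySem.Set.ofList xs) v = xs.contains v := by
  rw [Bool.eq_iff_iff]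
  simp only [PySem.Set.contains, List.contains_iff_mem, PySem.Set.mem_ofList]

theorem pvAlt_eq_any (ls : List String) (ind : Int × Int) (sym_set : List String) :
    is_adjancent_alt ls ind sym_set
      = ([(-1, -1), (-1, 0), (0, -1), (-1, 1), (1, -1), (0, 1), (1, 0), (1, 1)] :
          List (Int × Int)).any (pvGood ls ind sym_set) := by
  rw [Bool.eq_iff_iff]
  simp only [is_adjancent_alt, List.any_eq_true, PySem.List.mem_enumerate_iff]
  constructor
  · rintro ⟨rp, ⟨k, hk, rfl⟩, hcell⟩
    split at hcell
    · exact absurd hcell (by simp)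
    case isFalse hguard =>
      simp only [Bool.or_eq_true, decide_eq_true_eq, not_or, not_lt] at hguard
      obtain ⟨hg1, hg2⟩ := hguard
      obtain ⟨rx, hrxmem, hcond⟩ := List.any_eq_true.1 hcell
      obtain ⟨hrx0, hrxw⟩ := PySem.List.mem_pyRange_one.1 hrxmem
      rcases hrow : PySem.Str.pyGet? ls[k] rx with _ | c
      · simp only [hrow, Bool.and_eq_true] at hcond
        exact absurd hcond.2 (by simp)
      · simp only [hrow, Bool.and_eq_true, decide_eq_true_eq, Bool.not_eq_true',
          Bool.and_eq_false_iff, decide_eq_false_iff_not, zero_add] at hcond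
        obtain ⟨⟨⟨hx1, hx2⟩, hcen⟩, hmatch⟩ := hcond
        refine ⟨((k:Int) - ind.1, rx - ind.2), (pvMem8 _ _).2 ⟨by omega, by omega,
          by rcases hcen with h | h <;> (rintro ⟨h1, h2⟩; apply h; omega)⟩, ?_⟩
        have e3 : ind.1 + ((k:Int) - ind.1) = (k:Int) := by omega
        have e4 : ind.2 + (rx - ind.2) = rx := by omega
        have hget : PySem.List.pyGet? ls ((k:Int)) = some ls[((k:Int)).toNat] :=
          PySem.List.pyGet?_eq_some_getElem ls (by omega) (by exact_mod_cast hk)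
        simp only [pvGood, pvCriteria, pvProbe, e3, e4,
          show ((k:Int) - ind.1) + ind.1 = (k:Int) from by omega,
          show (rx - ind.2) + ind.2 = rx from by omega,
          hget, Int.toNat_natCast, hrow, Bool.and_eq_true, decide_eq_true_eq, ge_iff_le]
        refine ⟨⟨⟨⟨?_, ?_⟩, ?_⟩, ?_⟩, ?_⟩
        · exact_mod_cast hk
        · omega
        · exact hrxw
        · exact hrx0
        · rw [← pvContains]; exact hmatch
  · rintro ⟨p, hp8, hgood⟩
    obtain ⟨hdy, hdx, hnc⟩ := (pvMem8 p.1 p.2).1 (by exact Prod.mk.eta ▸ hp8)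
    rw [pvGood, Bool.and_eq_true] at hgood
    obtain ⟨hcrit, hprobe⟩ := hgood
    simp only [pvCriteria, Bool.and_eq_true, decide_eq_true_eq, ge_iff_le] at hcrit
    obtain ⟨⟨⟨hb1, hb2⟩, hb3⟩, hb4⟩ := hcrit
    have hy0 : (0:Int) ≤ ind.1 + p.1 := by omega
    have hy1 : ind.1 + p.1 < (ls.length : Int) := by omega
    have hget : PySem.List.pyGet? ls (ind.1 + p.1) = some ls[(ind.1 + p.1).toNat] :=
      PySem.List.pyGet?_eq_some_getElem ls hy0 hy1
    simp only [pvProbe, hget] at hprobe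
    set k : Nat := (ind.1 + p.1).toNat with hkdef
    have hkl : k < ls.length := by omega
    have hkc : ((k:Int)) = ind.1 + p.1 := by omega
    refine ⟨((0:Int) + (k:Int), ls[k]), ⟨k, hkl, rfl⟩, ?_⟩
    rw [if_neg (by simp only [Bool.or_eq_true, decide_eq_true_eq]; omega)]
    refine List.any_eq_true.2 ⟨ind.2 + p.2, PySem.List.mem_pyRange_one.2 ⟨by omega, by omega⟩, ?_⟩
    rcases hrow : PySem.Str.pyGet? ls[(ind.1 + p.1).toNat] (ind.2 + p.2) with _ | c
    · simp only [hrow] at hprobe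
      exact absurd hprobe Bool.false_ne_true
    · simp only [hrow] at hprobe
      simp only [pvContains, Bool.and_eq_true, decide_eq_true_eq,
        Bool.not_eq_true', Bool.and_eq_false_iff, decide_eq_false_iff_not, zero_add]
      refine ⟨⟨⟨by omega, by omega⟩, ?_⟩, hprobe⟩
      rcases Decidable.em ((k:Int) = ind.1) with h | h
      · right; intro hx; apply hnc; constructor <;> omega
      · left; exact h


-- ===== VERDICT (by name: the statement is the Claim_ definition above) =====
theorem is_adjancent_spec : Claim_equal_is_adjancent := by
  intro ls ind sym_set _hdom hpre
  unfold Spec_is_adjancent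
  show is_adjancent ls ind sym_set = is_adjancent_alt ls ind sym_set
  rw [pvAlt_eq_any]
  show pvLoopA ls ind.1 ind.2 sym_set
      (in_range ls ind [(-1, -1), (-1, 0), (0, -1), (-1, 1), (1, -1), (0, 1), (1, 0), (1, 1)]) = _
  unfold in_range
  rw [pvLoopA_eq_any ls ind sym_set _ (fun p hp => by
    have hmem := List.mem_of_mem_filter hp
    have hc := List.of_mem_filter hp
    exact pvCriteria_well ls ind sym_set hpre p hmem hc)]
  rw [List.any_filter]
  rfl
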